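-- pv_equiv track=rewrite | github.com/mw197hub/codingame | easy/The Michelangelo Code/main.py | sucheAnfang
-- ===== SOURCE A (Python) =====
-- def sucheAnfang(word,textNew):
--     allList = []
--     posList = []
--     keinTreffer = False
--     maxWert = 9999
--     for w in word:
--         anzahl = 0
--         posList.clear()
--         for t in textNew:
--             if t == w:
--                 posList.append(anzahl)
--             anzahl += 1
--         if len(posList) == 0:
--             keinTreffer = True
--         if len(posList) > 0 and posList[len(posList)-1] < maxWert:
--             maxWert = posList[len(posList)-1]
--         allList.append(posList[:])
--     return keinTreffer,allList,maxWert
-- ===== SOURCE B (Python) =====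
-- def sucheAnfang(word, textNew):
--     pos = {}
--     for i, t in enumerate(textNew):
--         pos.setdefault(t, []).append(i)
--     allList = [pos.get(w, []) for w in word]
--     keinTreffer = any(not l for l in allList)
--     lasts = [l[-1] for l in allList if l]
--     maxWert = min([9999] + lasts)
--     return keinTreffer, allList, maxWert
-- ===== Notes on version B (the rewrite author's own statement) =====
-- stated objective: faster
-- what changed: Replaces the per-word-character rescans of the whole text by a single pass that groups positions of each text character in a dict, followed by O(1) lookups per word character; keinTreffer/maxWert fall out of the collected lists via any/min instead of being threaded through the scan loop.
import Mathlib
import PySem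

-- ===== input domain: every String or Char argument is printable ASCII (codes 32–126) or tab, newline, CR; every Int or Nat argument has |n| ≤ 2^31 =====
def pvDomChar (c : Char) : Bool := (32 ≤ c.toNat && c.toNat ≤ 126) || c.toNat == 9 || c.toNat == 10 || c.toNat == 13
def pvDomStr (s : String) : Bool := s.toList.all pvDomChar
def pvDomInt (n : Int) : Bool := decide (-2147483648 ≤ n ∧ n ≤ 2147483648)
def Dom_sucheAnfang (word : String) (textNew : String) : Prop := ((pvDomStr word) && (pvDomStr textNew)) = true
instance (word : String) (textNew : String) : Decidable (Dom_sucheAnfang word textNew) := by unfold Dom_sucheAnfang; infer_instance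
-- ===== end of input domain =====

-- B replaces A's per-word-character rescan of the text by one grouping pass (dict char -> positions) plus lookups; asymptotically faster.

-- ===== PORT A =====
def sucheAnfang (word : String) (textNew : String) : Bool × List (List Int) × Int :=
  let r := word.toList.foldl (fun (st : List (List Int) × Bool × Int) w =>
      let inner := textNew.toList.foldl
        (fun (p : List Int × Int) t => ((if t == w then p.1 ++ [p.2] else p.1), p.2 + 1)) ([], 0)
      let posList := inner.1
      let kein := if posList.length = 0 then true else st.2.1
      let maxW := if 0 < posList.length ∧
          PySem.List.pyGetD posList ((posList.length : Int) - 1) 0 < st.2.2 then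
          PySem.List.pyGetD posList ((posList.length : Int) - 1) 0
        else st.2.2
      (st.1 ++ [posList], kein, maxW)) ([], false, 9999)
  (r.2.1, r.1, r.2.2)

-- ===== PORT B =====
def sucheAnfang_alt (word : String) (textNew : String) : Bool × List (List Int) × Int :=
  let pos := (PySem.List.enumerate textNew.toList 0).foldl
      (fun (d : PySem.Dict Char (List Int)) p => d.modify p.2 [] (· ++ [p.1])) PySem.Dict.empty
  let allList := word.toList.map (fun w => pos.getD w [])
  let kein := allList.any (fun l => l.isEmpty)
  let lasts := allList.filterMap (fun l => PySem.List.pyGet? l (-1))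
  let maxWert := match PySem.List.min? ((9999 : Int) :: lasts) (fun x => x) with
    | some m => m
    | none => 9999
  (kein, allList, maxWert)

-- ===== PRECONDITION & SPEC =====
def Spec_sucheAnfang (word : String) (textNew : String) (out : Bool × List (List Int) × Int) : Prop := out = sucheAnfang_alt word textNew
instance (word : String) (textNew : String) (out : Bool × List (List Int) × Int) : Decidable (Spec_sucheAnfang word textNew out) := by unfold Spec_sucheAnfang; infer_instance

-- ===== CLAIM (what is proved, stated in full; the proofs are below) =====
def Claim_equal_sucheAnfang : Prop := ∀ (word : String) (textNew : String), Dom_sucheAnfang word textNew → Spec_sucheAnfang word textNew (sucheAnfang word textNew)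

-- ===== LEMMAS AND PROOFS =====

-- positions of w in ts, counting from n (the value both programs compute per word character)
def pvPos (w : Char) (ts : List Char) (n : Int) : List Int :=
  ((PySem.List.enumerate ts n).filter (fun p => p.2 == w)).map (·.1)

theorem pvPos_cons (w : Char) (t : Char) (ts : List Char) (n : Int) :
    pvPos w (t :: ts) n = (if t == w then [n] else []) ++ pvPos w ts (n + 1) := by
  simp [pvPos, PySem.List.enumerate_cons]
  by_cases h : t = w <;> simp [h]

-- A's inner scan computes pvPos
theorem innerA_eq (w : Char) (ts : List Char) (acc : List Int) (n : Int) :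
    (ts.foldl (fun (p : List Int × Int) t => ((if t == w then p.1 ++ [p.2] else p.1), p.2 + 1)) (acc, n)).1
      = acc ++ pvPos w ts n := by
  induction ts generalizing acc n with
  | nil => simp [pvPos]
  | cons t ts ih =>
    rw [pvPos_cons, List.foldl_cons]
    by_cases h : (t == w) = true
    · simp only [if_pos h]
      rw [ih]
      simp
    · simp only [if_neg h]
      rw [ih]
      simp

-- B's dict lookup computes pvPos (from 0)
theorem dictB_eq (w : Char) (ts : List Char) :
    ((PySem.List.enumerate ts 0).foldl
        (fun (d : PySem.Dict Char (List Int)) p => d.modify p.2 [] (· ++ [p.1])) PySem.Dict.empty).getD w []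
      = pvPos w ts 0 := by
  have h := PySem.Dict.getD_foldl_modify_append ((PySem.List.enumerate ts 0).map (fun p => (p.2, p.1)))
      (PySem.Dict.empty) w
  rw [List.foldl_map] at h
  simp only at h
  rw [h]
  simp [pvPos, List.filter_map, List.map_map, Function.comp_def]

-- last element of a nonempty list via pyGetD at length-1
theorem pyGetD_last (l : List Int) (h : l ≠ []) :
    PySem.List.pyGetD l ((l.length : Int) - 1) 0 = l.getLast h := by
  have hlen : 0 < l.length := List.length_pos_iff.mpr h
  rw [show ((l.length : Int) - 1) = ((l.length - 1 : Nat) : Int) by omega]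
  rw [PySem.List.pyGetD_natCast]
  rw [List.getD_eq_getElem l 0 (by omega)]
  exact (List.getLast_eq_getElem h).symm

-- the max update over a list of position lists is a running min over their last elements
theorem max_fold_eq (ls : List (List Int)) (m : Int) :
    ls.foldl (fun m l => if 0 < l.length ∧ PySem.List.pyGetD l ((l.length : Int) - 1) 0 < m
        then PySem.List.pyGetD l ((l.length : Int) - 1) 0 else m) m
      = (ls.filterMap (fun l => PySem.List.pyGet? l (-1))).foldl min m := by
  induction ls generalizing m with
  | nil => rfl
  | cons l ls ih =>
    by_cases hl : l = []
    · subst hl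
      have hnone : PySem.List.pyGet? ([] : List Int) (-1) = none := rfl
      rw [List.foldl_cons, List.filterMap_cons, hnone,
        show (if 0 < ([] : List Int).length ∧
            PySem.List.pyGetD ([] : List Int) ((([] : List Int).length : Int) - 1) 0 < m
          then PySem.List.pyGetD ([] : List Int) ((([] : List Int).length : Int) - 1) 0 else m) = m
          by simp]
      exact ih m
    · have hlast : PySem.List.pyGet? l (-1) = some (l.getLast hl) := by
        rw [PySem.List.pyGet?_neg_one]
        exact List.getLast?_eq_some_getLast hl
      simp only [List.foldl_cons, List.filterMap_cons, hlast, pyGetD_last l hl]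
      rw [ih]
      congr 1
      have hlen : 0 < l.length := List.length_pos_iff.mpr hl
      rcases lt_or_ge (l.getLast hl) m with h | h
      · rw [if_pos ⟨hlen, h⟩, min_eq_right h.le]
      · rw [if_neg (by omega), min_eq_left h]

-- A's outer loop, characterised
theorem outerA_eq (ts : List Char) (ws : List Char) (acc : List (List Int)) (k : Bool) (m : Int) :
    ws.foldl (fun (st : List (List Int) × Bool × Int) w =>
      let inner := ts.foldl
        (fun (p : List Int × Int) t => ((if t == w then p.1 ++ [p.2] else p.1), p.2 + 1)) ([], 0)
      let posList := inner.1
      let kein := if posList.length = 0 then true else st.2.1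
      let maxW := if 0 < posList.length ∧
          PySem.List.pyGetD posList ((posList.length : Int) - 1) 0 < st.2.2 then
          PySem.List.pyGetD posList ((posList.length : Int) - 1) 0
        else st.2.2
      (st.1 ++ [posList], kein, maxW)) (acc, k, m)
    = (acc ++ ws.map (fun w => pvPos w ts 0),
       k || (ws.map (fun w => pvPos w ts 0)).any (fun l => l.isEmpty),
       (ws.map (fun w => pvPos w ts 0)).foldl
         (fun m l => if 0 < l.length ∧ PySem.List.pyGetD l ((l.length : Int) - 1) 0 < m
            then PySem.List.pyGetD l ((l.length : Int) - 1) 0 else m) m) := by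
  induction ws generalizing acc k m with
  | nil => simp
  | cons w ws ih =>
    simp only [List.foldl_cons, List.map_cons, List.any_cons]
    rw [innerA_eq w ts [] 0]
    simp only [List.nil_append]
    rw [ih]
    simp only [Prod.mk.injEq]
    refine ⟨by simp, ?_, by trivial⟩
    by_cases h : pvPos w ts 0 = [] <;> cases k <;> simp [h, List.isEmpty_iff]

-- ===== VERDICT (by name: the statement is the Claim_ definition above) =====
theorem sucheAnfang_spec : Claim_equal_sucheAnfang := by
  intro word textNew _
  unfold Spec_sucheAnfang sucheAnfang sucheAnfang_alt
  simp only
  rw [outerA_eq]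
  have hmap : word.toList.map (fun w => pvPos w textNew.toList 0)
      = word.toList.map (fun w => ((PySem.List.enumerate textNew.toList 0).foldl
          (fun (d : PySem.Dict Char (List Int)) p => d.modify p.2 [] (· ++ [p.1]))
          PySem.Dict.empty).getD w []) :=
    List.map_congr_left (fun w _ => (dictB_eq w textNew.toList).symm)
  rw [hmap, max_fold_eq, PySem.List.min?_id_cons]
  simp
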